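-- pv_equiv track=rewrite | github.com/alvinary/artale | taggers/cfgs.py | show_parses
-- ===== SOURCE A (Python) =====
-- from collections import defaultdict
--
-- def fill(s, t):
--     return s + ' ' * (len(t) - len(s))
--
-- def max_len(s, t):
--     if len(s) < len(t):
--         return t
--     else:
--         return s
--
-- def show_parses(model_text, name, string):
--
--     facts = model_text.split(", ")
--
--     parse_prefix = "segment"
--     prefix_length = len(parse_prefix.split())
--
--     parses_on = [f for f in facts if parse_prefix in f and name in f]
--
--     parses = [f.split()[prefix_length:] for f in parses_on]
--
--     strings = set([f[1] for f in parses])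
--     strings |= set([f[2] for f in parses])
--     strings = sorted(list(strings))
--
--     who_parses = {}
--
--     get_int = lambda s: int(''.join([t for t in s if t in '1234567890'][1:]))
--
--     for A, s1, s2 in parses:
--         i = get_int(s1) - 1
--         j = get_int(s2) - 1
--         # assert ((i, j) not in who_parses.keys())
--         who_parses[i, j] = A
--
--     segments = defaultdict(lambda: list())
--     for i in range(len(strings)):
--         for j in range(i+1, len(strings)):
--             segments[j - i].append((i, j))
--
--     parse_table = []
--
--     segment_sizes = sorted(segments.keys())
--     segment_sizes = [s for s in segment_sizes if s > 0]
--
--     max_terminal = ''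
--
--     for size in segment_sizes:
--
--         row = [' ' for s in string]
--         used_segments = [(i, j) for (i, j) in segments[size] if (i, j) in who_parses]
--
--         for i, j in used_segments:
--
--             terminal = who_parses[i, j]
--
--             if terminal == 'start':
--                 terminal = 'S'
--
--             max_terminal = max_len(max_terminal, terminal)
--
--             row[i] = terminal
--
--         parse_table = [row] + parse_table
--
--     parse_table = [[fill(s, max_terminal) for s in row] for row in parse_table]
--     parse_table = [''.join(row) for row in parse_table]
--     parse = "\n".join(parse_table)
--     parse = parse + "\n" + ''.join([fill(s, max_terminal) for s in string])
--
--     return parse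
-- ===== SOURCE B (Python) =====
-- def show_parses(model_text, name, string):
--     def cell(tok):
--         return int(''.join([c for c in tok if c in '1234567890'][1:])) - 1
--
--     spans = {}
--     names = set()
--     for fact in model_text.split(", "):
--         if "segment" in fact and name in fact:
--             toks = fact.split()
--             names.add(toks[2])
--             names.add(toks[3])
--             spans[cell(toks[2]), cell(toks[3])] = 'S' if toks[1] == 'start' else toks[1]
--
--     m = len(names)
--     by_size = {}
--     w = 0
--     for (i, j), label in spans.items():
--         if 0 <= i < j < m:
--             w = max(w, len(label))
--             by_size.setdefault(j - i, []).append((i, label))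
--
--     cw = max(1, w)
--     n = len(string)
--     lines = []
--     for size in range(m - 1, 0, -1):
--         pieces = []
--         col = 0
--         for i, label in sorted(by_size.get(size, []), key=lambda e: e[0]):
--             pieces.append(' ' * ((i - col) * cw))
--             pieces.append(label + ' ' * (w - len(label)))
--             col = i + 1
--         pieces.append(' ' * ((n - col) * cw))
--         lines.append(''.join(pieces))
--     base = ''.join(c + ' ' * (w - 1) for c in string)
--     return "\n".join(lines) + "\n" + base
-- ===== Notes on version B (the rewrite author's own statement) =====
-- stated objective: alternative
-- what changed: B drops A's all-pairs segments table, scatter row writes, running max_len fold and second whole-table padding pass: it builds the span-cell dictionary and name set in one fused pass over the facts, groups the live cells by segment size with a running width maximum in one pass over the dictionary items, and emits each output row by gap/run-length concatenation (' '*k space blocks) over the sorted entries of that size alone instead of writing into and then padding a per-character row buffer.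
import Mathlib
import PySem

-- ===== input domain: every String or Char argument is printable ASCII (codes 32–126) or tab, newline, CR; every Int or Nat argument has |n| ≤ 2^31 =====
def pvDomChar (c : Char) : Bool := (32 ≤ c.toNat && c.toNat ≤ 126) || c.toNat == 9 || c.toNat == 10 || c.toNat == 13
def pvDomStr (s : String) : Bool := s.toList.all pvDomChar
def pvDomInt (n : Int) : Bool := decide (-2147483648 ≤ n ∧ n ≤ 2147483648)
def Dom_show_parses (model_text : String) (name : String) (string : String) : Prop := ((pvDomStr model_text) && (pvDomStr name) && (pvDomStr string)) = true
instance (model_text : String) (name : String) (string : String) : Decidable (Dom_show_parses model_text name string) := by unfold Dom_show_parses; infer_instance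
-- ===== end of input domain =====

-- B replaces A's all-pairs "segments" table, scatter row updates and second padding pass by a
-- single grouping pass over the span cells and gap/run-length emission of each row from its
-- sorted entries alone (objective: alternative).

-- ===== PORT A =====
def pvFill (s t : String) : String :=
  String.ofList (s.toList ++ List.replicate (t.toList.length - s.toList.length) ' ')

def pvMaxLen (s t : String) : String :=
  if s.toList.length < t.toList.length then t else s

def pvGetInt (s : String) : Int :=
  (PySem.Int.ofChars? (PySem.List.slice
    (s.toList.filter (fun t => PySem.Chars.isIn [t] "1234567890".toList)) (some 1) none)).getD 0

def show_parses (model_text : String) (name : String) (string : String) : String :=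
  let facts := (PySem.Str.split? model_text ", ").getD []
  let prefix_length := (PySem.Str.split₀ "segment").length
  let parses_on := facts.filter (fun f => PySem.Str.isIn "segment" f && PySem.Str.isIn name f)
  let parses := parses_on.map (fun f => PySem.List.slice (PySem.Str.split₀ f) (some (prefix_length : Int)) none)
  let strings : PySem.Set String := PySem.Set.union
      (PySem.Set.ofList (parses.map (fun f => (PySem.List.pyGet? f 1).getD "")))
      (parses.map (fun f => (PySem.List.pyGet? f 2).getD ""))
  let stringsSorted := PySem.List.sorted strings (fun s => s)
  let who_parses : PySem.Dict (Int × Int) String :=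
    parses.foldl (fun d f =>
      let A := (PySem.List.pyGet? f 0).getD ""
      let s1 := (PySem.List.pyGet? f 1).getD ""
      let s2 := (PySem.List.pyGet? f 2).getD ""
      d.insert (pvGetInt s1 - 1, pvGetInt s2 - 1) A) PySem.Dict.empty
  let m : Int := (stringsSorted.length : Int)
  let segments : PySem.Dict Int (List (Int × Int)) :=
    (PySem.List.pyRange 0 m).foldl (fun d i =>
      (PySem.List.pyRange (i + 1) m).foldl (fun d j =>
        d.modify (j - i) [] (fun l => l ++ [(i, j)])) d) PySem.Dict.empty
  let segment_sizes := PySem.List.sorted segments.keys (fun s => s)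
  let segment_sizes := segment_sizes.filter (fun s => decide (0 < s))
  let res := segment_sizes.foldl (fun (st : List (List String) × String) size =>
      let row := string.toList.map (fun _ => " ")
      let used := (segments.getD size []).filter (fun ij => who_parses.contains ij)
      let inner := used.foldl (fun (st2 : List String × String) ij =>
          let terminal := (who_parses.get? ij).getD ""
          let terminal := if terminal == "start" then "S" else terminal
          (st2.1.set ij.1.toNat terminal, pvMaxLen st2.2 terminal)) (row, st.2)
      ([inner.1] ++ st.1, inner.2)) ([], "")
  let parse_table := res.1.map (fun row => row.map (fun s => pvFill s res.2))
  let parse_table := parse_table.map (fun row => PySem.Str.join "" row)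
  let parse := PySem.Str.join "\n" parse_table
  String.ofList (parse.toList ++ "\n".toList ++
    (PySem.Str.join "" (string.toList.map (fun c => pvFill (String.ofList [c]) res.2))).toList)

-- ===== PORT B =====
def pvCell (s : String) : Int :=
  (PySem.Int.ofChars?
    ((s.toList.filter (fun c => PySem.Chars.isIn [c] "1234567890".toList)).drop 1)).getD 0 - 1

def show_parses_alt (model_text : String) (name : String) (string : String) : String :=
  let st := ((PySem.Str.split? model_text ", ").getD []).foldl
    (fun (st : PySem.Dict (Int × Int) String × PySem.Set String) fact =>
      if PySem.Str.isIn "segment" fact && PySem.Str.isIn name fact then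
        let toks := PySem.Str.split₀ fact
        (st.1.insert (pvCell ((PySem.List.pyGet? toks 2).getD ""), pvCell ((PySem.List.pyGet? toks 3).getD ""))
           (if ((PySem.List.pyGet? toks 1).getD "") == "start" then "S"
            else (PySem.List.pyGet? toks 1).getD ""),
         PySem.Set.add (PySem.Set.add st.2 ((PySem.List.pyGet? toks 2).getD ""))
           ((PySem.List.pyGet? toks 3).getD ""))
      else st)
    (PySem.Dict.empty, PySem.Set.empty)
  let spans := st.1
  let m : Int := (st.2.length : Int)
  let bw := spans.items.foldl
    (fun (bw : PySem.Dict Int (List (Int × String)) × Int) p =>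
      if decide (0 ≤ p.1.1 ∧ p.1.1 < p.1.2 ∧ p.1.2 < m) then
        (bw.1.modify (p.1.2 - p.1.1) [] (fun l => l ++ [(p.1.1, p.2)]), max bw.2 (PySem.Str.len p.2))
      else bw)
    (PySem.Dict.empty, 0)
  let w := bw.2
  let cw := max 1 w
  let n := PySem.Str.len string
  let lines := (PySem.List.pyRange (m - 1) 0 (-1)).map (fun size =>
    let pc := (PySem.List.sorted (bw.1.getD size []) (fun e => e.1)).foldl
      (fun (pc : List String × Int) e =>
        (pc.1 ++ [String.ofList (List.replicate ((e.1 - pc.2) * cw).toNat ' '),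
                  String.ofList (e.2.toList ++ List.replicate ((w - PySem.Str.len e.2).toNat) ' ')],
         e.1 + 1))
      ([], 0)
    PySem.Str.join "" (pc.1 ++ [String.ofList (List.replicate ((n - pc.2) * cw).toNat ' ')]))
  let base := PySem.Str.join "" (string.toList.map (fun c =>
    String.ofList (c :: List.replicate (w - 1).toNat ' ')))
  String.ofList ((PySem.Str.join "\n" lines).toList ++ '\n' :: base.toList)

-- ===== PRECONDITION & SPEC =====
def pvNDigits (s : String) : Nat :=
  (s.toList.filter (fun c => PySem.Chars.isIn [c] "1234567890".toList)).length

def pvMatching (model_text : String) (name : String) : List (List String) :=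
  (((PySem.Str.split? model_text ", ").getD []).filter
      (fun f => PySem.Str.isIn "segment" f && PySem.Str.isIn name f)).map PySem.Str.split₀

def pvNNames (model_text : String) (name : String) : Nat :=
  ((pvMatching model_text name).foldl (fun s t =>
    PySem.Set.add (PySem.Set.add s ((PySem.List.pyGet? t 2).getD "")) ((PySem.List.pyGet? t 3).getD ""))
    PySem.Set.empty).length

-- Pre_ excludes exactly the inputs where the Python A raises: a matching fact whose whitespace
-- split has not exactly 4 tokens (IndexError/ValueError on unpacking), a position token with
-- fewer than two digit characters (ValueError in int('')), or an in-range parsed cell whose row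
-- index reaches past len(string) (IndexError on row[i]).
def Pre_show_parses (model_text : String) (name : String) (string : String) : Prop :=
  ∀ t ∈ pvMatching model_text name,
    t.length = 4 ∧
    2 ≤ pvNDigits ((PySem.List.pyGet? t 2).getD "") ∧
    2 ≤ pvNDigits ((PySem.List.pyGet? t 3).getD "") ∧
    ((0 ≤ pvCell ((PySem.List.pyGet? t 2).getD "") ∧
      pvCell ((PySem.List.pyGet? t 2).getD "") < pvCell ((PySem.List.pyGet? t 3).getD "") ∧
      pvCell ((PySem.List.pyGet? t 3).getD "") < (pvNNames model_text name : Int)) →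
      pvCell ((PySem.List.pyGet? t 2).getD "") < PySem.Str.len string)

instance (model_text : String) (name : String) (string : String) : Decidable (Pre_show_parses model_text name string) := by
  unfold Pre_show_parses; infer_instance

def pvWitness_show_parses : String × String × String :=
  ("segment np x11 x12", "x", "a")

def Spec_show_parses (model_text : String) (name : String) (string : String) (out : String) : Prop := out = show_parses_alt model_text name string
instance (model_text : String) (name : String) (string : String) (out : String) : Decidable (Spec_show_parses model_text name string out) := by unfold Spec_show_parses; infer_instance

-- ===== CLAIM (what is proved, stated in full; the proofs are below) =====
def Claim_equal_show_parses : Prop := ∀ (model_text : String) (name : String) (string : String), Dom_show_parses model_text name string → Pre_show_parses model_text name string → Spec_show_parses model_text name string (show_parses model_text name string)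

-- ===== LEMMAS AND PROOFS =====

-- shared abstractions of the two computations
def pvT1 (t : List String) : String := (PySem.List.pyGet? t 1).getD ""
def pvT2 (t : List String) : String := (PySem.List.pyGet? t 2).getD ""
def pvT3 (t : List String) : String := (PySem.List.pyGet? t 3).getD ""
def pvKey (t : List String) : Int × Int := (pvCell (pvT2 t), pvCell (pvT3 t))
def pvTr (a : String) : String := if a == "start" then "S" else a
def pvWho (M : List (List String)) : PySem.Dict (Int × Int) String :=
  M.foldl (fun d t => d.insert (pvKey t) (pvT1 t)) PySem.Dict.empty
def pvCellsD (M : List (List String)) : PySem.Dict (Int × Int) String :=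
  M.foldl (fun d t => d.insert (pvKey t) (pvTr (pvT1 t))) PySem.Dict.empty
def pvNamesL (M : List (List String)) : PySem.Set String :=
  M.foldl (fun s t => PySem.Set.add (PySem.Set.add s (pvT2 t)) (pvT3 t)) PySem.Set.empty
def pvM (M : List (List String)) : Int := ((pvNamesL M).length : Int)
def pvLive (M : List (List String)) : List ((Int × Int) × String) :=
  (pvCellsD M).items.filter (fun p => decide (0 ≤ p.1.1 ∧ p.1.1 < p.1.2 ∧ p.1.2 < pvM M))
def pvW (M : List (List String)) : Nat :=
  ((pvLive M).map (fun p => p.2.toList.length)).foldl max 0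
def pvPadI (w : Int) (s : String) : String :=
  String.ofList (s.toList ++ List.replicate (w - PySem.Str.len s).toNat ' ')
def pvRowCell (M : List (List String)) (size i : Int) : String :=
  if (pvCellsD M).contains (i, i + size) && decide (i + size < pvM M)
  then pvPadI ((pvW M : Nat) : Int) (((pvCellsD M).get? (i, i + size)).getD " ")
  else pvPadI ((pvW M : Nat) : Int) " "
def pvRow (M : List (List String)) (string : String) (size : Int) : String :=
  PySem.Str.join "" ((PySem.List.pyRange 0 (PySem.Str.len string)).map (pvRowCell M size))
def pvCanon (M : List (List String)) (string : String) : String :=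
  String.ofList ((PySem.Str.join "\n" ((PySem.List.pyRange (pvM M - 1) 0 (-1)).map (pvRow M string))).toList ++ '\n' ::
    (PySem.Str.join "" (string.toList.map (fun c => pvPadI ((pvW M : Nat) : Int) (String.ofList [c])))).toList)

-- pvGetInt computes pvCell's value plus one
theorem pvCell_eq (s : String) : pvGetInt s - 1 = pvCell s := by
  unfold pvGetInt pvCell
  rw [PySem.List.slice_from _ (by norm_num : (0:Int) ≤ 1)]
  rfl

-- max(...) over cast lengths is the Nat running maximum
theorem pvFoldlMaxCast (u : List Nat) (b : Nat) :
    (u.map (fun (n : Nat) => (n : Int))).foldl max ((b : Nat) : Int) = ((u.foldl max b : Nat) : Int) := by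
  induction u generalizing b with
  | nil => rfl
  | cons x t ih =>
    rw [List.map_cons, List.foldl_cons, List.foldl_cons, ← Nat.cast_max, ih]

-- closed forms for pyRange with step 1 and -1
theorem pvRange_one_map (a b : Int) :
    PySem.List.pyRange a b = (List.range (b - a).toNat).map (fun (k : Nat) => a + (k : Int)) := by
  unfold PySem.List.pyRange
  rw [if_neg (by norm_num), if_pos (by norm_num : (0:Int) < 1)]
  by_cases h : a < b
  · rw [if_pos h]
    show List.map (fun (k : Nat) => a + 1 * (k : Int)) (List.range ((b - a + 1 - 1)/1).toNat) = _
    have h2 : (b - a + 1 - 1) / 1 = b - a := by omega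
    rw [h2]
    exact List.map_congr_left (fun k _ => by ring)
  · rw [if_neg h]
    have h2 : (b - a).toNat = 0 := by omega
    rw [h2]
    rfl

theorem pvRange_neg_one_map (a b : Int) :
    PySem.List.pyRange a b (-1) = (List.range (a - b).toNat).map (fun (k : Nat) => a - (k : Int)) := by
  unfold PySem.List.pyRange
  rw [if_neg (by norm_num), if_neg (by norm_num : ¬ (0:Int) < -1)]
  by_cases h : b < a
  · rw [if_pos h]
    show List.map (fun (k : Nat) => a + -1 * (k : Int)) (List.range ((a - b + - -1 - 1)/ - -1).toNat) = _
    have h2 : (a - b + - -1 - 1) / - -1 = a - b := by norm_num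
    rw [h2]
    exact List.map_congr_left (fun k _ => by ring)
  · rw [if_neg h]
    have h2 : (a - b).toNat = 0 := by omega
    rw [h2]
    rfl

-- python's  range(n-1, 0, -1)  is  list(reversed(range(1, n)))
theorem pvRange_rev (m : Int) :
    PySem.List.pyRange (m - 1) 0 (-1) = (PySem.List.pyRange 1 m).reverse := by
  rw [pvRange_neg_one_map, pvRange_one_map]
  apply List.ext_getElem
  · simp only [List.length_map, List.length_range, List.length_reverse]
    omega
  · intro i h1 h2
    simp only [List.length_map, List.length_range] at h1 h2
    rw [List.getElem_reverse]
    simp only [List.getElem_map, List.getElem_range, List.length_map, List.length_range]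
    omega

-- prepending loop  table = [row] + table  is reverse-map
theorem pvFoldl_prepend {α β : Type} (l : List α) (f : α → β) (acc : List β) :
    l.foldl (fun tb x => [f x] ++ tb) acc = (l.map f).reverse ++ acc := by
  induction l generalizing acc with
  | nil => rfl
  | cons x t _ => simp

-- a fold of pvMaxLen tracks exactly the maximum length
theorem pvMaxLen_len (l : List String) (a : String) :
    ((l.foldl (fun mt s => pvMaxLen mt s) a).toList.length)
      = (l.map (fun s => s.toList.length)).foldl max a.toList.length := by
  induction l generalizing a with
  | nil => rfl
  | cons x t ih =>
    simp only [List.foldl_cons, List.map_cons]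
    rw [ih]
    congr 1
    unfold pvMaxLen
    split <;> rename_i h <;> omega

-- scatter writes at index-determined values, read back pointwise
theorem pvScatter_len {α : Type} (l : List (Int × Int)) (v : Int × Int → α) (r0 : List α) :
    (l.foldl (fun r p => r.set p.1.toNat (v p)) r0).length = r0.length := by
  induction l generalizing r0 with
  | nil => rfl
  | cons p t ih => simp [ih]

theorem pvScatter_get {α : Type} (l : List (Int × Int)) (g : Nat → α) (v : Int × Int → α)
    (hfun : ∀ p ∈ l, v p = g p.1.toNat) (r0 : List α) (k : Nat) :
    (l.foldl (fun r p => r.set p.1.toNat (v p)) r0)[k]? =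
      if (∃ p ∈ l, p.1.toNat = k) ∧ k < r0.length then some (g k) else r0[k]? := by
  induction l generalizing r0 with
  | nil => simp
  | cons p t ih =>
    simp only [List.foldl_cons]
    rw [ih (fun q hq => hfun q (List.mem_cons_of_mem _ hq))]
    by_cases h1 : (∃ q ∈ t, q.1.toNat = k) ∧ k < r0.length
    · rw [if_pos (by simpa using h1), if_pos (by exact ⟨⟨h1.1.choose, List.mem_cons_of_mem _ h1.1.choose_spec.1, h1.1.choose_spec.2⟩, h1.2⟩)]
    · rw [if_neg (by simpa using h1)]
      rw [List.getElem?_set]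
      by_cases h2 : p.1.toNat = k
      · subst h2
        by_cases h3 : p.1.toNat < r0.length
        · rw [if_pos rfl, if_pos h3, if_pos ⟨⟨p, List.mem_cons_self, rfl⟩, h3⟩, hfun p List.mem_cons_self]
        · rw [if_pos rfl, if_neg h3, if_neg (fun hc => h3 hc.2)]
          exact (List.getElem?_eq_none (by omega)).symm
      · rw [if_neg h2]
        rw [if_neg ?_]
        intro hc
        rcases hc with ⟨⟨q, hq, hqk⟩, hk⟩
        rcases List.mem_cons.1 hq with rfl | hq'
        · exact h2 hqk
        · exact h1 ⟨⟨q, hq', hqk⟩, hk⟩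


-- ---- A-side abstractions: the parses/who/strings stage ----

theorem pvDrop0 (t : List String) : PySem.List.pyGet? (t.drop 1) 0 = PySem.List.pyGet? t 1 := by
  simp [pysem]

theorem pvDrop1 (t : List String) : PySem.List.pyGet? (t.drop 1) 1 = PySem.List.pyGet? t 2 := by
  simp [pysem]

theorem pvDrop2 (t : List String) : PySem.List.pyGet? (t.drop 1) 2 = PySem.List.pyGet? t 3 := by
  simp [pysem]

theorem pvNamesL_flat (M : List (List String)) :
    pvNamesL M = PySem.Set.ofList (M.flatMap (fun t => [pvT2 t, pvT3 t])) := by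
  unfold pvNamesL
  rw [PySem.Set.ofList_eq_foldl, List.flatMap_def, List.foldl_flatten, List.foldl_map]
  rfl

theorem pvNamesL_mem (M : List (List String)) (x : String) :
    x ∈ pvNamesL M ↔ ∃ t ∈ M, x = pvT2 t ∨ x = pvT3 t := by
  rw [pvNamesL_flat, PySem.Set.mem_ofList, List.mem_flatMap]
  constructor
  · rintro ⟨t, ht, hx⟩
    rcases List.mem_cons.1 hx with rfl | hx'
    · exact ⟨t, ht, Or.inl rfl⟩
    · rcases List.mem_cons.1 hx' with rfl | h
      · exact ⟨t, ht, Or.inr rfl⟩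
      · cases h
  · rintro ⟨t, ht, rfl | rfl⟩
    · exact ⟨t, ht, List.mem_cons_self⟩
    · exact ⟨t, ht, List.mem_cons_of_mem _ List.mem_cons_self⟩

theorem pvNamesL_nodup (M : List (List String)) : (pvNamesL M).Nodup := by
  rw [pvNamesL_flat]; exact PySem.Set.nodup_ofList _

theorem pvNames_len (M : List (List String)) :
    (PySem.Set.union (PySem.Set.ofList (M.map pvT2)) (M.map pvT3) : PySem.Set String).length
      = (pvNamesL M).length := by
  apply List.Perm.length_eq
  rw [List.perm_ext_iff_of_nodup
    (PySem.Set.nodup_union _ _ (PySem.Set.nodup_ofList _)) (pvNamesL_nodup M)]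
  intro x
  rw [PySem.Set.mem_union, PySem.Set.mem_ofList, pvNamesL_mem]
  simp only [List.mem_map]
  constructor
  · rintro (⟨t, ht, rfl⟩ | ⟨t, ht, rfl⟩)
    · exact ⟨t, ht, Or.inl rfl⟩
    · exact ⟨t, ht, Or.inr rfl⟩
  · rintro ⟨t, ht, rfl | rfl⟩
    · exact Or.inl ⟨t, ht, rfl⟩
    · exact Or.inr ⟨t, ht, rfl⟩

-- ---- who/cells relation ----

theorem pvCells_items_aux (l : List (List String)) :
    ∀ (dA dB : PySem.Dict (Int × Int) String),
      dB.items = dA.items.map (fun p => (p.1, pvTr p.2)) →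
      (l.foldl (fun d t => d.insert (pvKey t) (pvTr (pvT1 t))) dB).items
        = (l.foldl (fun d t => d.insert (pvKey t) (pvT1 t)) dA).items.map (fun p => (p.1, pvTr p.2)) := by
  induction l with
  | nil => intro dA dB h; exact h
  | cons t l ih =>
    intro dA dB h
    simp only [List.foldl_cons]
    apply ih
    have hc : dB.contains (pvKey t) = dA.contains (pvKey t) := by
      unfold PySem.Dict.contains
      rw [h, List.any_map]
      rfl
    by_cases hk : dA.contains (pvKey t) = true
    · rw [PySem.Dict.items_insert_of_contains _ _ (by rw [hc]; exact hk),
        PySem.Dict.items_insert_of_contains _ _ hk, h, List.map_map, List.map_map]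
      apply List.map_congr_left
      intro p _
      simp only [Function.comp]
      by_cases hpk : (p.1 == pvKey t) = true
      · simp [hpk]
      · simp [hpk]
    · rw [PySem.Dict.items_insert_of_not_contains _ _ (by rw [hc]; simpa using hk),
        PySem.Dict.items_insert_of_not_contains _ _ (by simpa using hk), h, List.map_append]
      rfl

theorem pvCells_items (M : List (List String)) :
    (pvCellsD M).items = (pvWho M).items.map (fun p => (p.1, pvTr p.2)) := by
  unfold pvCellsD pvWho
  exact pvCells_items_aux M PySem.Dict.empty PySem.Dict.empty rfl

theorem pvCells_contains (M : List (List String)) (k : Int × Int) :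
    (pvCellsD M).contains k = (pvWho M).contains k := by
  unfold PySem.Dict.contains
  rw [pvCells_items, List.any_map]
  rfl

theorem pvCells_get? (M : List (List String)) (k : Int × Int) :
    (pvCellsD M).get? k = ((pvWho M).get? k).map pvTr := by
  unfold PySem.Dict.get?
  rw [pvCells_items, List.find?_map]
  have : ((fun p => p.1 == k) ∘ (fun (p : (Int × Int) × String) => (p.1, pvTr p.2)))
      = (fun (p : (Int × Int) × String) => p.1 == k) := rfl
  rw [this, Option.map_map, Option.map_map]
  rfl

theorem pvWho_keys_nodup (M : List (List String)) : (pvWho M).keys.Nodup := by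
  unfold pvWho
  exact PySem.Dict.nodup_keys_foldl_insert_key M pvKey (fun _ t => pvT1 t) _
    (by simp [PySem.Dict.empty, PySem.Dict.keys])

theorem pvCells_keys_eq (M : List (List String)) : (pvCellsD M).keys = (pvWho M).keys := by
  unfold PySem.Dict.keys
  rw [pvCells_items, List.map_map]
  rfl

theorem pvCells_keys_nodup (M : List (List String)) : (pvCellsD M).keys.Nodup := by
  rw [pvCells_keys_eq]
  exact pvWho_keys_nodup M

-- ---- the segments dictionary: an all-pairs groupby ----

def pvAllP (m : Int) : List (Int × Int) :=
  (PySem.List.pyRange 0 m).flatMap (fun i => (PySem.List.pyRange (i + 1) m).map (fun j => (i, j)))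

def pvSeg (m : Int) : PySem.Dict Int (List (Int × Int)) :=
  (PySem.List.pyRange 0 m).foldl (fun d i =>
    (PySem.List.pyRange (i + 1) m).foldl (fun d j =>
      d.modify (j - i) [] (fun l => l ++ [(i, j)])) d) PySem.Dict.empty

theorem pvSeg_def (m : Int) :
    (PySem.List.pyRange 0 m).foldl (fun d i =>
      (PySem.List.pyRange (i + 1) m).foldl (fun d j =>
        d.modify (j - i) [] (fun l => l ++ [(i, j)])) d) PySem.Dict.empty = pvSeg m := rfl

theorem pvSeg_flat (m : Int) :
    pvSeg m = ((pvAllP m).map (fun p : Int × Int => (p.2 - p.1, p))).foldl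
      (fun d q => d.modify q.1 [] (fun l => l ++ [q.2])) PySem.Dict.empty := by
  rw [List.foldl_map]
  unfold pvAllP
  rw [List.flatMap_def, List.foldl_flatten, List.foldl_map]
  unfold pvSeg
  apply PySem.List.foldl_congr_mem
  intro d i _
  rw [List.foldl_map]

theorem pvSeg_getD (m size : Int) :
    (pvSeg m).getD size [] = (pvAllP m).filter (fun p => p.2 - p.1 == size) := by
  rw [pvSeg_flat, PySem.Dict.getD_foldl_modify_append, PySem.Dict.getD_empty, List.nil_append,
    List.filter_map]
  have h : ((fun q : Int × (Int × Int) => q.1 == size) ∘ (fun p : Int × Int => (p.2 - p.1, p)))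
      = fun p : Int × Int => p.2 - p.1 == size := rfl
  rw [h, List.map_map]
  have h2 : ((fun x : Int × (Int × Int) => x.2) ∘ fun p : Int × Int => (p.2 - p.1, p))
      = (id : Int × Int → Int × Int) := rfl
  rw [h2, List.map_id]

theorem pvAllP_mem (m : Int) (p : Int × Int) :
    p ∈ pvAllP m ↔ 0 ≤ p.1 ∧ p.1 < p.2 ∧ p.2 < m := by
  unfold pvAllP
  rw [List.mem_flatMap]
  constructor
  · rintro ⟨i, hi, hp⟩
    rcases List.mem_map.1 hp with ⟨j, hj, rfl⟩
    rw [PySem.List.mem_pyRange_one] at hi hj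
    exact ⟨hi.1, by omega, by omega⟩
  · rintro ⟨h1, h2, h3⟩
    refine ⟨p.1, PySem.List.mem_pyRange_one.2 ⟨h1, by omega⟩, List.mem_map.2 ⟨p.2, PySem.List.mem_pyRange_one.2 ⟨by omega, h3⟩, rfl⟩⟩

theorem pvSeg_keys (m : Int) :
    (pvSeg m).keys = PySem.Set.ofList ((pvAllP m).map (fun p : Int × Int => p.2 - p.1)) := by
  rw [pvSeg_flat, PySem.Dict.keys_foldl_modify_key, List.map_map]
  have h : (PySem.Dict.empty : PySem.Dict Int (List (Int × Int))).keys = ([] : List Int) := rfl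
  rw [h, PySem.Set.ofList_eq_foldl]
  rfl

theorem pvSizes_eq (m : Int) :
    (PySem.List.sorted (pvSeg m).keys (fun s => s)).filter (fun s => decide (0 < s))
      = PySem.List.pyRange 1 m := by
  have hs : PySem.List.sorted (pvSeg m).keys (fun s => s) = PySem.List.pyRange 1 m := by
    apply PySem.List.sorted_eq_of_perm_of_pairwise_lt
    · rw [List.perm_ext_iff_of_nodup (PySem.List.nodup_pyRange_one 1 m)
        (pvSeg_keys m ▸ PySem.Set.nodup_ofList _)]
      intro x
      rw [PySem.List.mem_pyRange_one, pvSeg_keys, PySem.Set.mem_ofList, List.mem_map]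
      constructor
      · rintro ⟨h1, h2⟩
        exact ⟨(0, x), (pvAllP_mem m (0, x)).2 ⟨le_refl 0, by omega, by omega⟩, by omega⟩
      · rintro ⟨p, hp, rfl⟩
        rw [pvAllP_mem] at hp
        omega
    · exact PySem.List.pairwise_lt_pyRange_one 1 m
  rw [hs, List.filter_eq_self.2]
  intro x hx
  rw [PySem.List.mem_pyRange_one] at hx
  simpa using by omega

-- ---- width / padding ----

theorem pvFoldlMax_mem_eq (l1 l2 : List Nat) (h : ∀ x, x ∈ l1 ↔ x ∈ l2) :
    l1.foldl max 0 = l2.foldl max 0 := by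
  have key : ∀ (u v : List Nat), (∀ x, x ∈ u → x ∈ v) → u.foldl max 0 ≤ v.foldl max 0 := by
    intro u v huv
    rcases PySem.List.foldl_max_mem u 0 with h0 | hmem
    · rw [h0]; exact Nat.zero_le _
    · exact (PySem.List.le_foldl_max v 0).2 _ (huv _ hmem)
  exact Nat.le_antisymm (key l1 l2 fun x => (h x).1) (key l2 l1 fun x => (h x).2)

-- ---- fill = pad once the width is the length of the running longest terminal ----

theorem pvFill_pad (M : List (List String)) (MT : String) (hMT : MT.toList.length = pvW M)
    (s : String) : pvFill s MT = pvPadI ((pvW M : Nat) : Int) s := by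
  unfold pvFill pvPadI
  rw [hMT, PySem.Str.len_eq, Int.toNat_sub]

-- ---- the used segments and the running longest terminal ----

def pvUsed (M : List (List String)) (size : Int) : List (Int × Int) :=
  ((pvSeg (pvM M)).getD size []).filter (fun ij => (pvWho M).contains ij)

def pvUsedAll (M : List (List String)) : List (Int × Int) :=
  (PySem.List.pyRange 1 (pvM M)).flatMap (pvUsed M)

def pvMT (M : List (List String)) : String :=
  (pvUsedAll M).foldl (fun mt ij => pvMaxLen mt (pvTr (((pvWho M).get? ij).getD ""))) ""

theorem pvUsed_mem (M : List (List String)) (size : Int) (p : Int × Int) :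
    p ∈ pvUsed M size ↔ p ∈ pvAllP (pvM M) ∧ p.2 - p.1 = size ∧ (pvWho M).contains p = true := by
  unfold pvUsed
  rw [List.mem_filter, pvSeg_getD, List.mem_filter]
  constructor
  · rintro ⟨⟨h1, h2⟩, h3⟩
    exact ⟨h1, by simpa using h2, h3⟩
  · rintro ⟨h1, h2, h3⟩
    exact ⟨⟨h1, by simpa using h2⟩, h3⟩

theorem pvUsedAll_mem (M : List (List String)) (p : Int × Int) :
    p ∈ pvUsedAll M ↔ p ∈ pvAllP (pvM M) ∧ (pvWho M).contains p = true := by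
  unfold pvUsedAll
  rw [List.mem_flatMap]
  constructor
  · rintro ⟨size, _, hp⟩
    have h := (pvUsed_mem M size p).1 hp
    exact ⟨h.1, h.2.2⟩
  · rintro ⟨h1, h2⟩
    have hb := (pvAllP_mem _ p).1 h1
    refine ⟨p.2 - p.1, PySem.List.mem_pyRange_one.2 ⟨by omega, by omega⟩, (pvUsed_mem M _ p).2 ⟨h1, rfl, h2⟩⟩

theorem pvMT_len (M : List (List String)) : (pvMT M).toList.length = pvW M := by
  unfold pvMT pvW pvLive
  rw [← List.foldl_map (f := fun ij => pvTr (((pvWho M).get? ij).getD ""))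
    (g := fun mt s => pvMaxLen mt s), pvMaxLen_len, List.map_map]
  apply pvFoldlMax_mem_eq
  intro x
  rw [List.mem_map, List.mem_map]
  constructor
  · rintro ⟨p, hp, rfl⟩
    rw [pvUsedAll_mem] at hp
    obtain ⟨hall, hc⟩ := hp
    have hiso : ((pvWho M).get? p).isSome := by
      rw [← PySem.Dict.contains_eq_isSome_get?]
      exact hc
    obtain ⟨v, hv⟩ := Option.isSome_iff_exists.1 hiso
    have hcg := pvCells_get? M p
    rw [hv] at hcg
    refine ⟨(p, pvTr v), List.mem_filter.2 ⟨PySem.Dict.mem_items_of_get?_eq_some (d := pvCellsD M) (by simpa using hcg), ?_⟩, ?_⟩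
    · have := (pvAllP_mem _ p).1 hall
      simpa using this
    · simp [hv]
  · rintro ⟨q, hq, rfl⟩
    obtain ⟨hmem, hvalid⟩ := List.mem_filter.1 hq
    have hget : (pvCellsD M).get? q.1 = some q.2 :=
      PySem.Dict.get?_of_mem_items (pvCellsD M) hmem (pvCells_keys_nodup M)
    rw [pvCells_get? M q.1] at hget
    obtain ⟨v, hv, htr⟩ := Option.map_eq_some_iff.1 hget
    refine ⟨q.1, ?_, by simp [hv, htr]⟩
    rw [pvUsedAll_mem]
    constructor
    · rw [pvAllP_mem]
      simpa using hvalid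
    · rw [PySem.Dict.contains_eq_isSome_get?, hv]
      rfl

-- ---- the scatter row equals the gather row ----

theorem pvRowA (M : List (List String)) (string : String) (size : Int)
    (hsize : size ∈ PySem.List.pyRange 1 (pvM M)) (MT : String)
    (hMT : MT.toList.length = pvW M) :
    PySem.Str.join "" (((pvUsed M size).foldl (fun (row : List String) ij =>
        row.set ij.1.toNat (pvTr (((pvWho M).get? ij).getD ""))) (string.toList.map (fun _ => " "))).map
      (fun s => pvFill s MT)) = pvRow M string size := by
  have hs1 : (1 : Int) ≤ size := (PySem.List.mem_pyRange_one.1 hsize).1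
  unfold pvRow
  congr 1
  set L := string.toList.length with hL
  have hrow0 : (string.toList.map (fun _ => " ")).length = L := by rw [List.length_map, hL]
  have hscatlen : ((pvUsed M size).foldl (fun (row : List String) ij =>
      row.set ij.1.toNat (pvTr (((pvWho M).get? ij).getD ""))) (string.toList.map (fun _ => " "))).length = L := by
    rw [pvScatter_len]; exact hrow0
  apply List.ext_getElem
  · rw [List.length_map, hscatlen, List.length_map, PySem.List.length_pyRange_one, PySem.Str.len_eq]
    rw [hL]
    omega
  · intro i h1 h2
    rw [List.length_map, hscatlen] at h1
    rw [List.getElem_map, List.getElem_map]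
    -- right-hand element
    have hrng : ∀ (hh : i < (PySem.List.pyRange 0 (PySem.Str.len string)).length),
        (PySem.List.pyRange 0 (PySem.Str.len string))[i]'hh = (i : Int) := by
      intro hh
      simp only [pvRange_one_map, List.getElem_map, List.getElem_range]
      omega
    rw [hrng _]
    simp only [pvRowCell]
    -- left-hand element via the scatter characterisation
    have hfun : ∀ p ∈ pvUsed M size,
        (fun ij => pvTr (((pvWho M).get? ij).getD "")) p
          = (fun k : Nat => pvTr (((pvWho M).get? ((k : Int), (k : Int) + size)).getD "")) p.1.toNat := by
      intro p hp
      rw [pvUsed_mem] at hp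
      have hb := (pvAllP_mem _ p).1 hp.1
      beta_reduce
      have hpe : (((p.1.toNat : Int)), ((p.1.toNat : Int)) + size) = p := by
        obtain ⟨pa, pb⟩ := p
        simp only [Prod.mk.injEq]
        refine ⟨?_, ?_⟩ <;> (simp_all; try omega)
      rw [hpe]
    have hsc := pvScatter_get (pvUsed M size)
      (fun k : Nat => pvTr (((pvWho M).get? ((k : Int), (k : Int) + size)).getD ""))
      (fun ij => pvTr (((pvWho M).get? ij).getD "")) hfun (string.toList.map (fun _ => " ")) i
    have hr0 : (string.toList.map (fun _ => " "))[i]? = some " " := by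
      rw [List.getElem?_eq_getElem (by rw [hrow0]; exact h1)]
      simp
    rw [hr0, hrow0] at hsc
    have hcond : ((∃ p ∈ pvUsed M size, p.1.toNat = i) ∧ i < L)
        ↔ ((pvWho M).contains ((i : Int), (i : Int) + size) = true ∧ (i : Int) + size < pvM M) := by
      constructor
      · rintro ⟨⟨p, hp, hpi⟩, _⟩
        rw [pvUsed_mem] at hp
        have hb := (pvAllP_mem _ p).1 hp.1
        have h1' : (((i : Int)), ((i : Int)) + size) = p := by
          obtain ⟨pa, pb⟩ := p
          simp only [Prod.mk.injEq]
          constructor <;> (simp_all; try omega)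
        have h2' : ((i : Int)) + size = p.2 := by omega
        rw [h1', h2']
        exact ⟨hp.2.2, hb.2.2⟩
      · rintro ⟨hc, hm⟩
        refine ⟨⟨((i : Int), (i : Int) + size), (pvUsed_mem M size _).2 ⟨(pvAllP_mem _ _).2 ⟨by omega, by omega, hm⟩, by omega, hc⟩, by omega⟩, h1⟩
    by_cases hcase : (pvWho M).contains ((i : Int), (i : Int) + size) = true ∧ (i : Int) + size < pvM M
    · rw [if_pos (hcond.2 hcase)] at hsc
      have hget := List.getElem?_eq_getElem (l := (pvUsed M size).foldl (fun (row : List String) ij =>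
        row.set ij.1.toNat (pvTr (((pvWho M).get? ij).getD ""))) (string.toList.map (fun _ => " ")))
        (i := i) (by rw [hscatlen]; exact h1)
      rw [hget] at hsc
      have hval := Option.some.inj hsc
      rw [hval]
      -- rhs takes the then-branch
      rw [if_pos (by
        rw [pvCells_contains]
        simp only [Bool.and_eq_true, decide_eq_true_eq]
        exact hcase)]
      have hvs : ((pvWho M).get? ((i : Int), (i : Int) + size)).isSome = true := by
        rw [← PySem.Dict.contains_eq_isSome_get?]
        exact hcase.1
      obtain ⟨v, hv⟩ := Option.isSome_iff_exists.1 hvs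
      rw [pvCells_get?, hv]
      rw [pvFill_pad M MT hMT]
      simp
    · rw [if_neg (fun hc => hcase (hcond.1 hc))] at hsc
      have hget := List.getElem?_eq_getElem (l := (pvUsed M size).foldl (fun (row : List String) ij =>
        row.set ij.1.toNat (pvTr (((pvWho M).get? ij).getD ""))) (string.toList.map (fun _ => " ")))
        (i := i) (by rw [hscatlen]; exact h1)
      rw [hget] at hsc
      have hval := Option.some.inj hsc
      rw [hval]
      rw [if_neg (by
        rw [pvCells_contains]
        simp only [Bool.and_eq_true, decide_eq_true_eq]
        exact hcase)]
      exact pvFill_pad M MT hMT " "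

theorem pvUsed_def2 (M : List (List String)) (size : Int) :
    ((pvSeg (pvM M)).getD size []).filter (fun ij => (pvWho M).contains ij) = pvUsed M size := rfl

theorem pvTr_def (a : String) : (if a == "start" then "S" else a) = pvTr a := rfl

-- splitting A's two-accumulator table loop into a reverse-map and a flat running maximum
theorem pvOuter (sizes : List Int) (used : Int → List (Int × Int)) (val : Int × Int → String)
    (row0 : List String) :
    sizes.foldl (fun (st : List (List String) × String) size =>
      ([((used size).foldl (fun (st2 : List String × String) ij =>
          (st2.1.set ij.1.toNat (val ij), pvMaxLen st2.2 (val ij))) (row0, st.2)).1] ++ st.1,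
       ((used size).foldl (fun (st2 : List String × String) ij =>
          (st2.1.set ij.1.toNat (val ij), pvMaxLen st2.2 (val ij))) (row0, st.2)).2)) ([], "")
    = ((sizes.map (fun size => (used size).foldl (fun row ij => row.set ij.1.toNat (val ij)) row0)).reverse,
       (sizes.flatMap used).foldl (fun mt ij => pvMaxLen mt (val ij)) "") := by
  have hb : (fun (st : List (List String) × String) (size : Int) =>
      (([((used size).foldl (fun (st2 : List String × String) ij =>
          (st2.1.set ij.1.toNat (val ij), pvMaxLen st2.2 (val ij))) (row0, st.2)).1] ++ st.1,
       ((used size).foldl (fun (st2 : List String × String) ij =>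
          (st2.1.set ij.1.toNat (val ij), pvMaxLen st2.2 (val ij))) (row0, st.2)).2) :
        List (List String) × String))
      = (fun st size => ([(used size).foldl (fun row ij => row.set ij.1.toNat (val ij)) row0] ++ st.1,
          (used size).foldl (fun mt ij => pvMaxLen mt (val ij)) st.2)) := by
    funext st size
    rw [PySem.List.foldl_prod_mk (f := fun (row : List String) ij => row.set ij.1.toNat (val ij))
      (g := fun (mt : String) ij => pvMaxLen mt (val ij))]
  rw [hb, PySem.List.foldl_prod_mk
    (f := fun tb size => [(used size).foldl (fun row ij => row.set ij.1.toNat (val ij)) row0] ++ tb)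
    (g := fun mt size => (used size).foldl (fun mt' ij => pvMaxLen mt' (val ij)) mt)]
  refine Prod.ext ?_ ?_
  · show (sizes.foldl (fun tb size => [(used size).foldl (fun row ij => row.set ij.1.toNat (val ij)) row0] ++ tb) []) = _
    rw [pvFoldl_prepend sizes (fun size => (used size).foldl (fun row ij => row.set ij.1.toNat (val ij)) row0) []]
    exact List.append_nil _
  · show (sizes.foldl (fun mt size => (used size).foldl (fun mt' ij => pvMaxLen mt' (val ij)) mt) "") = _
    rw [List.flatMap_def, List.foldl_flatten, List.foldl_map]

theorem pvA_canon (mt nm s : String) : show_parses mt nm s = pvCanon (pvMatching mt nm) s := by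
  simp only [show_parses]
  have hparses : (((PySem.Str.split? mt ", ").getD []).filter
      (fun f => PySem.Str.isIn "segment" f && PySem.Str.isIn nm f)).map
      (fun f => PySem.List.slice (PySem.Str.split₀ f) (some ((PySem.Str.split₀ "segment").length : Int)) none)
      = (pvMatching mt nm).map (List.drop 1) := by
    unfold pvMatching
    rw [List.map_map]
    apply List.map_congr_left
    intro f _
    have h1 : ((PySem.Str.split₀ "segment").length : Int) = 1 := rfl
    rw [h1, PySem.List.slice_from _ (by norm_num)]
    rfl
  rw [hparses]
  have hwho : ((pvMatching mt nm).map (List.drop 1)).foldl (fun d f =>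
      d.insert (pvGetInt ((PySem.List.pyGet? f 1).getD "") - 1, pvGetInt ((PySem.List.pyGet? f 2).getD "") - 1)
        ((PySem.List.pyGet? f 0).getD "")) PySem.Dict.empty = pvWho (pvMatching mt nm) := by
    rw [List.foldl_map]
    unfold pvWho
    apply PySem.List.foldl_congr_mem
    intro d t _
    rw [pvCell_eq, pvCell_eq]
    unfold pvKey pvT1 pvT2 pvT3
    rw [pvDrop0, pvDrop1, pvDrop2]
  rw [hwho]
  have e1 : ((pvMatching mt nm).map (List.drop 1)).map (fun f => (PySem.List.pyGet? f 1).getD "")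
      = (pvMatching mt nm).map pvT2 := by
    rw [List.map_map]
    apply List.map_congr_left
    intro t _
    show ((PySem.List.pyGet? (t.drop 1) 1).getD "") = pvT2 t
    unfold pvT2
    rw [pvDrop1]
  have e2 : ((pvMatching mt nm).map (List.drop 1)).map (fun f => (PySem.List.pyGet? f 2).getD "")
      = (pvMatching mt nm).map pvT3 := by
    rw [List.map_map]
    apply List.map_congr_left
    intro t _
    show ((PySem.List.pyGet? (t.drop 1) 2).getD "") = pvT3 t
    unfold pvT3
    rw [pvDrop2]
  rw [e1, e2]
  have hm : (((PySem.List.sorted (PySem.Set.union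
      (PySem.Set.ofList ((pvMatching mt nm).map pvT2))
      ((pvMatching mt nm).map pvT3)) (fun s => s)).length : Nat) : Int) = pvM (pvMatching mt nm) := by
    unfold pvM
    congr 1
    rw [(PySem.List.sorted_perm _ _ _).length_eq]
    exact pvNames_len _
  rw [hm, pvSeg_def, pvSizes_eq]
  simp only [pvTr_def]
  rw [pvOuter (PySem.List.pyRange 1 (pvM (pvMatching mt nm)))
    (fun size => ((pvSeg (pvM (pvMatching mt nm))).getD size []).filter
      (fun ij => (pvWho (pvMatching mt nm)).contains ij))
    (fun ij => pvTr (((pvWho (pvMatching mt nm)).get? ij).getD ""))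
    (s.toList.map (fun _ => " "))]
  dsimp only
  rw [List.map_reverse, List.map_map]
  have hused : (fun size => ((pvSeg (pvM (pvMatching mt nm))).getD size []).filter
      (fun ij => (pvWho (pvMatching mt nm)).contains ij)) = pvUsed (pvMatching mt nm) := rfl
  rw [hused]
  have hmt : ((PySem.List.pyRange 1 (pvM (pvMatching mt nm))).flatMap (pvUsed (pvMatching mt nm))).foldl
      (fun mt' ij => pvMaxLen mt' (pvTr (((pvWho (pvMatching mt nm)).get? ij).getD ""))) ""
      = pvMT (pvMatching mt nm) := rfl
  rw [hmt]
  rw [List.map_reverse, List.map_map]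
  have hrows : (PySem.List.pyRange 1 (pvM (pvMatching mt nm))).map
      ((fun row => PySem.Str.join "" row) ∘
        ((fun row => row.map (fun s0 => pvFill s0 (pvMT (pvMatching mt nm)))) ∘
          (fun size => (((pvSeg (pvM (pvMatching mt nm))).getD size []).filter
              (fun ij => (pvWho (pvMatching mt nm)).contains ij)).foldl
            (fun row ij => row.set ij.1.toNat (pvTr (((pvWho (pvMatching mt nm)).get? ij).getD "")))
            (s.toList.map (fun _ => " ")))))
      = (PySem.List.pyRange 1 (pvM (pvMatching mt nm))).map (pvRow (pvMatching mt nm) s) := by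
    apply List.map_congr_left
    intro size hsize
    simp only [Function.comp_apply]
    rw [pvUsed_def2]
    exact pvRowA (pvMatching mt nm) s size hsize (pvMT (pvMatching mt nm)) (pvMT_len _)
  rw [hrows]
  have hlast : s.toList.map (fun c => pvFill (String.ofList [c]) (pvMT (pvMatching mt nm)))
      = s.toList.map (fun c => pvPadI ((pvW (pvMatching mt nm) : Nat) : Int) (String.ofList [c])) := by
    apply List.map_congr_left
    intro c _
    exact pvFill_pad _ _ (pvMT_len _) _
  rw [hlast]
  unfold pvCanon
  rw [pvRange_rev, List.map_reverse, List.append_assoc]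
  rfl

-- ---- B side: the fused building pass ----

theorem pvFactsFold (mt nm : String) :
    ((PySem.Str.split? mt ", ").getD []).foldl
      (fun (st : PySem.Dict (Int × Int) String × PySem.Set String) fact =>
        if PySem.Str.isIn "segment" fact && PySem.Str.isIn nm fact then
          (st.1.insert (pvCell ((PySem.List.pyGet? (PySem.Str.split₀ fact) 2).getD ""),
              pvCell ((PySem.List.pyGet? (PySem.Str.split₀ fact) 3).getD ""))
             (if ((PySem.List.pyGet? (PySem.Str.split₀ fact) 1).getD "") == "start" then "S"
              else (PySem.List.pyGet? (PySem.Str.split₀ fact) 1).getD ""),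
           PySem.Set.add (PySem.Set.add st.2 ((PySem.List.pyGet? (PySem.Str.split₀ fact) 2).getD ""))
             ((PySem.List.pyGet? (PySem.Str.split₀ fact) 3).getD ""))
        else st)
      (PySem.Dict.empty, PySem.Set.empty)
    = (pvCellsD (pvMatching mt nm), pvNamesL (pvMatching mt nm)) := by
  rw [← List.foldl_filter]
  rw [PySem.List.foldl_prod_mk
    (f := fun (d : PySem.Dict (Int × Int) String) fact =>
      d.insert (pvCell ((PySem.List.pyGet? (PySem.Str.split₀ fact) 2).getD ""),
          pvCell ((PySem.List.pyGet? (PySem.Str.split₀ fact) 3).getD ""))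
        (if ((PySem.List.pyGet? (PySem.Str.split₀ fact) 1).getD "" == "start") = true then "S"
         else (PySem.List.pyGet? (PySem.Str.split₀ fact) 1).getD ""))
    (g := fun (st : PySem.Set String) fact =>
      PySem.Set.add (PySem.Set.add st ((PySem.List.pyGet? (PySem.Str.split₀ fact) 2).getD ""))
        ((PySem.List.pyGet? (PySem.Str.split₀ fact) 3).getD ""))]
  unfold pvMatching pvCellsD pvNamesL
  rw [List.foldl_map, List.foldl_map]
  rfl

def pvBySize (M : List (List String)) : PySem.Dict Int (List (Int × String)) :=
  (pvLive M).foldl (fun d p => d.modify (p.1.2 - p.1.1) [] (fun l => l ++ [(p.1.1, p.2)])) PySem.Dict.empty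

theorem pvItemsFold (M : List (List String)) :
    (pvCellsD M).items.foldl
      (fun (bw : PySem.Dict Int (List (Int × String)) × Int) p =>
        if decide (0 ≤ p.1.1 ∧ p.1.1 < p.1.2 ∧ p.1.2 < pvM M) then
          (bw.1.modify (p.1.2 - p.1.1) [] (fun l => l ++ [(p.1.1, p.2)]), max bw.2 (PySem.Str.len p.2))
        else bw)
      (PySem.Dict.empty, 0)
    = (pvBySize M, ((pvW M : Nat) : Int)) := by
  rw [← List.foldl_filter]
  rw [PySem.List.foldl_prod_mk
    (f := fun (d : PySem.Dict Int (List (Int × String))) p => d.modify (p.1.2 - p.1.1) [] (fun l => l ++ [(p.1.1, p.2)]))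
    (g := fun (a : Int) (p : (Int × Int) × String) => max a (PySem.Str.len p.2))]
  refine Prod.ext rfl ?_
  show ((pvLive M).foldl (fun a p => max a (PySem.Str.len p.2)) 0) = ((pvW M : Nat) : Int)
  rw [← List.foldl_map (f := fun (p : (Int × Int) × String) => PySem.Str.len p.2)
    (g := fun (a b : Int) => max a b)]
  have hmap : (pvLive M).map (fun (p : (Int × Int) × String) => PySem.Str.len p.2)
      = ((pvLive M).map (fun p => p.2.toList.length)).map (fun (n : Nat) => (n : Int)) := by
    rw [List.map_map]
    apply List.map_congr_left
    intro p _
    exact PySem.Str.len_eq _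
  rw [hmap]
  have h0 : (0 : Int) = ((0 : Nat) : Int) := rfl
  rw [h0, pvFoldlMaxCast]
  rfl

def pvG (M : List (List String)) (size : Int) : List (Int × String) :=
  ((pvLive M).filter (fun p => p.1.2 - p.1.1 == size)).map (fun p => (p.1.1, p.2))

theorem pvBySize_getD (M : List (List String)) (size : Int) :
    (pvBySize M).getD size [] = pvG M size := by
  unfold pvBySize pvG
  rw [← List.foldl_map (f := fun (p : (Int × Int) × String) => (p.1.2 - p.1.1, (p.1.1, p.2)))
    (g := fun (d : PySem.Dict Int (List (Int × String))) (q : Int × (Int × String)) =>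
      d.modify q.1 [] (fun l => l ++ [q.2]))]
  rw [PySem.Dict.getD_foldl_modify_append, PySem.Dict.getD_empty, List.nil_append,
    List.filter_map, List.map_map]
  rfl

-- ---- keys of the cell dictionary come from the matching facts ----

theorem pvItems_key (M : List (List String)) :
    ∀ p ∈ (pvCellsD M).items, ∃ t ∈ M, p.1 = pvKey t := by
  intro p hp
  have hk : p.1 ∈ (pvCellsD M).keys := List.mem_map.2 ⟨p, hp, rfl⟩
  unfold pvCellsD at hk
  rw [PySem.Dict.keys_foldl_insert_key M pvKey (fun _ t => pvTr (pvT1 t))] at hk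
  rw [PySem.Set.mem_update] at hk
  rcases hk with h | h
  · exact absurd h (by simp [PySem.Dict.empty, PySem.Dict.keys])
  · rcases List.mem_map.1 h with ⟨t, ht, hkey⟩
    exact ⟨t, ht, hkey.symm⟩

theorem pvPre_bound (mt nm s : String) (hpre : Pre_show_parses mt nm s) :
    ∀ p ∈ (pvCellsD (pvMatching mt nm)).items,
      0 ≤ p.1.1 → p.1.1 < p.1.2 → p.1.2 < pvM (pvMatching mt nm) →
      p.1.1 < (s.toList.length : Int) := by
  intro p hp h0 h1 h2
  obtain ⟨t, ht, hkey⟩ := pvItems_key _ p hp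
  have hPt := (hpre t ht).2.2.2
  have hk1 : p.1.1 = pvCell (pvT2 t) := by rw [hkey]; rfl
  have hk2 : p.1.2 = pvCell (pvT3 t) := by rw [hkey]; rfl
  rw [hk1] at h0
  rw [hk1, hk2] at h1
  rw [hk2] at h2
  have hnn : (pvNNames mt nm : Int) = pvM (pvMatching mt nm) := rfl
  have := hPt ⟨h0, h1, by rw [hnn]; exact h2⟩
  rw [PySem.Str.len_eq] at this
  rw [hk1]
  exact this

-- ---- distinct columns inside one size group ----

theorem pvG_pairwise (M : List (List String)) (size : Int) :
    (pvG M size).Pairwise (fun a b => a.1 ≠ b.1) := by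
  unfold pvG
  rw [List.pairwise_map]
  have hkeys : ((pvCellsD M).items.map (fun p => p.1)).Pairwise (· ≠ ·) := pvCells_keys_nodup M
  have hnd : (pvCellsD M).items.Pairwise (fun p q => p.1 ≠ q.1) := List.pairwise_map.1 hkeys
  have hsub : ((pvLive M).filter (fun p => p.1.2 - p.1.1 == size)).Sublist (pvCellsD M).items :=
    List.filter_sublist.trans List.filter_sublist
  refine List.Pairwise.imp_of_mem ?_ (hnd.sublist hsub)
  intro a b ha hb hne
  have hsa : a.1.2 - a.1.1 = size := by simpa using (List.mem_filter.1 ha).2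
  have hsb : b.1.2 - b.1.1 = size := by simpa using (List.mem_filter.1 hb).2
  intro hfst
  apply hne
  have : a.1.2 = b.1.2 := by omega
  exact Prod.ext hfst this

theorem pvG_mem (M : List (List String)) (size : Int) (e : Int × String) :
    e ∈ pvG M size ↔
      (pvCellsD M).get? (e.1, e.1 + size) = some e.2 ∧ 0 ≤ e.1 ∧ e.1 < e.1 + size ∧
        e.1 + size < pvM M := by
  unfold pvG pvLive
  rw [List.mem_map]
  constructor
  · rintro ⟨p, hp, rfl⟩
    obtain ⟨hp1, hsz⟩ := List.mem_filter.1 hp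
    obtain ⟨hpi, hlive⟩ := List.mem_filter.1 hp1
    have hlive' : 0 ≤ p.1.1 ∧ p.1.1 < p.1.2 ∧ p.1.2 < pvM M := by simpa using hlive
    have hszi : p.1.2 - p.1.1 = size := by simpa using hsz
    have hk : (p.1.1, p.1.1 + size) = p.1 := by
      have hb : p.1.1 + size = p.1.2 := by omega
      rw [hb]
    refine ⟨?_, hlive'.1, by omega, by omega⟩
    show (pvCellsD M).get? (p.1.1, p.1.1 + size) = some p.2
    rw [hk]
    exact PySem.Dict.get?_of_mem_items (pvCellsD M) hpi (pvCells_keys_nodup M)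
  · rintro ⟨hget, h0, hs, hm⟩
    refine ⟨((e.1, e.1 + size), e.2), ?_, rfl⟩
    refine List.mem_filter.2 ⟨List.mem_filter.2 ⟨?_, ?_⟩, ?_⟩
    · exact PySem.Dict.mem_items_of_get?_eq_some (d := pvCellsD M) hget
    · simp only [decide_eq_true_eq]
      exact ⟨h0, hs, hm⟩
    · simp

-- ---- join with the empty separator is concatenation ----

theorem pvJoinNilFlatten (l : List (List Char)) : PySem.Chars.join [] l = l.flatten := by
  induction l with
  | nil => rfl
  | cons x t ih =>
    cases t with
    | nil => simp [PySem.Chars.join, List.intercalate]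
    | cons y u => simp_all [PySem.Chars.join_cons_cons]

theorem pvJoinEmpty (xs : List String) :
    (PySem.Str.join "" xs).toList = (xs.map String.toList).flatten := by
  rw [PySem.Str.toList_join]
  have h : ("" : String).toList = [] := rfl
  rw [h]
  exact pvJoinNilFlatten _

-- ---- padding, character-list views ----

theorem pvPadI_toList (W : Nat) (s : String) :
    (pvPadI ((W : Nat) : Int) s).toList = s.toList ++ List.replicate (W - s.toList.length) ' ' := by
  unfold pvPadI
  rw [String.toList_ofList, PySem.Str.len_eq, Int.toNat_sub]

theorem pvBlank_toList (W : Nat) :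
    (pvPadI ((W : Nat) : Int) " ").toList = List.replicate (max 1 W) ' ' := by
  rw [pvPadI_toList]
  have h1 : (" " : String).toList = [' '] := rfl
  rw [h1]
  show ' ' :: List.replicate (W - 1) ' ' = _
  rw [← List.replicate_succ]
  congr 1
  omega

theorem pvCastCnt (a b W : Nat) :
    ((((a : Nat) : Int) - ((b : Nat) : Int)) * max 1 ((W : Nat) : Int)).toNat
      = (a - b) * max 1 W := by
  have hmax : max 1 ((W : Nat) : Int) = ((max 1 W : Nat) : Int) := by push_cast; rfl
  rw [hmax]
  by_cases hc : b ≤ a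
  · have : ((a : Int) - (b : Int)) = ((a - b : Nat) : Int) := by omega
    rw [this, ← Nat.cast_mul, Int.toNat_natCast]
  · have h0 : a - b = 0 := by omega
    rw [h0, Nat.zero_mul]
    have hle : ((a : Int) - (b : Int)) * ((max 1 W : Nat) : Int) ≤ 0 :=
      mul_nonpos_of_nonpos_of_nonneg (by omega) (by positivity)
    omega

-- ---- the gap/run-length row renderer ----

def pvStep (w cw : Int) : (List String × Int) → (Int × String) → (List String × Int) :=
  fun pc e =>
    (pc.1 ++ [String.ofList (List.replicate ((e.1 - pc.2) * cw).toNat ' '),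
              String.ofList (e.2.toList ++ List.replicate ((w - PySem.Str.len e.2).toNat) ' ')],
     e.1 + 1)

def pvRender (w cw n : Int) : Int → List (Int × String) → List Char
  | col, [] => List.replicate ((n - col) * cw).toNat ' '
  | col, e :: rest =>
      List.replicate ((e.1 - col) * cw).toNat ' '
        ++ (e.2.toList ++ List.replicate ((w - PySem.Str.len e.2).toNat) ' ')
        ++ pvRender w cw n (e.1 + 1) rest

theorem pvFoldPieces (w cw n : Int) (entries : List (Int × String)) :
    ∀ (acc : List String) (col : Int),
    ((entries.foldl (pvStep w cw) (acc, col)).1.map String.toList).flatten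
        ++ List.replicate ((n - (entries.foldl (pvStep w cw) (acc, col)).2) * cw).toNat ' '
      = (acc.map String.toList).flatten ++ pvRender w cw n col entries := by
  induction entries with
  | nil =>
    intro acc col
    rfl
  | cons e rest ih =>
    intro acc col
    simp only [List.foldl_cons]
    have hstep : pvStep w cw (acc, col) e
        = (acc ++ [String.ofList (List.replicate ((e.1 - col) * cw).toNat ' '),
                   String.ofList (e.2.toList ++ List.replicate ((w - PySem.Str.len e.2).toNat) ' ')],
           e.1 + 1) := rfl
    rw [hstep, ih]
    simp only [pvRender, List.map_append, List.flatten_append, String.toList_ofList,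
      List.map_cons, List.map_nil, List.flatten_cons, List.flatten_nil, List.append_nil,
      List.append_assoc]

theorem pvBlanks (cw : Nat) (g : Nat → List Char) :
    ∀ (t s : Nat), (∀ k, s ≤ k → k < s + t → g k = List.replicate cw ' ') →
    ((List.range' s t).map g).flatten = List.replicate (t * cw) ' ' := by
  intro t
  induction t with
  | zero => intro s _; simp
  | succ t ih =>
    intro s h
    rw [List.range'_succ, List.map_cons, List.flatten_cons, h s (le_refl s) (by omega),
      ih (s + 1) (fun k hk1 hk2 => h k (by omega) (by omega)), ← List.replicate_add]
    congr 1
    ring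

theorem pvRenderCells (W nN : Nat) (g : Nat → List Char) :
    ∀ (entries : List (Int × String)) (col : Nat),
    entries.Pairwise (fun a b => a.1 < b.1) →
    (∀ e ∈ entries, (col : Int) ≤ e.1 ∧ e.1 < (nN : Int)) →
    (∀ e ∈ entries, g e.1.toNat = e.2.toList ++ List.replicate (W - e.2.toList.length) ' ') →
    (∀ k : Nat, col ≤ k → k < nN → (∀ e ∈ entries, e.1 ≠ (k : Int)) →
      g k = List.replicate (max 1 W) ' ') →
    pvRender ((W : Nat) : Int) (max 1 ((W : Nat) : Int)) ((nN : Nat) : Int) ((col : Nat) : Int) entries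
      = ((List.range' col (nN - col)).map g).flatten := by
  intro entries
  induction entries with
  | nil =>
    intro col _ _ _ hb
    show List.replicate ((((nN : Nat) : Int) - ((col : Nat) : Int)) * max 1 ((W : Nat) : Int)).toNat ' ' = _
    rw [pvBlanks (max 1 W) g (nN - col) col
      (fun k h1 h2 => hb k h1 (by omega) (fun e he => absurd he List.not_mem_nil)), pvCastCnt]
  | cons e rest ih =>
    intro col hpw hbd hpad hblank
    obtain ⟨hcol, hlt⟩ := hbd e List.mem_cons_self
    obtain ⟨hhead, htail⟩ := List.pairwise_cons.1 hpw
    have h0e : (0 : Int) ≤ e.1 := le_trans (by omega) hcol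
    have hie : e.1 = ((e.1.toNat : Nat) : Int) := by omega
    set iN := e.1.toNat with hiNdef
    have hcolle : col ≤ iN := by omega
    have hiNlt : iN < nN := by omega
    -- split the column range at the entry's column
    obtain ⟨t, h3⟩ : ∃ t, nN - iN = t + 1 := ⟨nN - iN - 1, by omega⟩
    have hsplit : List.range' col (nN - col) =
        List.range' col (iN - col) ++ iN :: List.range' (iN + 1) t := by
      have h1 : nN - col = (iN - col) + (nN - iN) := by omega
      have h2 : col + 1 * (iN - col) = iN := by omega
      rw [h1, ← List.range'_append, h2, h3, List.range'_succ]
    rw [hsplit, List.map_append, List.flatten_append, List.map_cons, List.flatten_cons]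
    -- the gap before the entry is all blank cells
    have hgap : ((List.range' col (iN - col)).map g).flatten
        = List.replicate ((iN - col) * max 1 W) ' ' := by
      apply pvBlanks
      intro k hk1 hk2
      apply hblank k hk1 (by omega)
      intro e' he'
      rcases List.mem_cons.1 he' with rfl | he''
      · omega
      · have := hhead e' he''
        omega
    -- the entry's own cell
    have hcell : g iN = e.2.toList ++ List.replicate (W - e.2.toList.length) ' ' :=
      hpad e List.mem_cons_self
    -- the tail by induction
    have htl : pvRender ((W : Nat) : Int) (max 1 ((W : Nat) : Int)) ((nN : Nat) : Int)
          (((iN + 1 : Nat) : Int)) rest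
        = ((List.range' (iN + 1) t).map g).flatten := by
      have hrange : nN - (iN + 1) = t := by omega
      rw [← hrange]
      apply ih (iN + 1) htail
      · intro e' he'
        have h1 := hhead e' he'
        have h2 := (hbd e' (List.mem_cons_of_mem _ he')).2
        constructor
        · omega
        · exact h2
      · intro e' he'
        exact hpad e' (List.mem_cons_of_mem _ he')
      · intro k hk1 hk2 hk3
        apply hblank k (by omega) hk2
        intro e' he'
        rcases List.mem_cons.1 he' with rfl | he''
        · omega
        · exact hk3 e' he''
    show List.replicate ((e.1 - ((col : Nat) : Int)) * max 1 ((W : Nat) : Int)).toNat ' '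
        ++ (e.2.toList ++ List.replicate ((((W : Nat) : Int) - PySem.Str.len e.2).toNat) ' ')
        ++ pvRender ((W : Nat) : Int) (max 1 ((W : Nat) : Int)) ((nN : Nat) : Int) (e.1 + 1) rest = _
    have hgapc : ((e.1 - ((col : Nat) : Int)) * max 1 ((W : Nat) : Int)).toNat
        = (iN - col) * max 1 W := by
      rw [hie]
      exact pvCastCnt iN col W
    have hpadc : List.replicate ((((W : Nat) : Int) - PySem.Str.len e.2).toNat) ' '
        = List.replicate (W - e.2.toList.length) ' ' := by
      rw [PySem.Str.len_eq, Int.toNat_sub]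
    have hnext : e.1 + 1 = (((iN + 1 : Nat) : Nat) : Int) := by omega
    rw [hgapc, hpadc, hnext, htl, hgap, hcell]
    rw [List.append_assoc]

-- ---- one line of B equals one gather row ----

theorem pvRow_toList (M : List (List String)) (s : String) (size : Int) :
    (pvRow M s size).toList
      = ((List.range' 0 s.toList.length).map (fun k : Nat => (pvRowCell M size ((k : Nat) : Int)).toList)).flatten := by
  unfold pvRow
  rw [pvJoinEmpty, List.map_map]
  congr 1
  rw [PySem.Str.len_eq, pvRange_one_map, List.map_map, ← List.range_eq_range']
  have h1 : ((s.toList.length : Int) - 0).toNat = s.toList.length := by omega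
  rw [h1]
  apply List.map_congr_left
  intro k _
  simp

theorem pvLineEq (M : List (List String)) (s : String) (size : Int)
    (hsz : 0 < size)
    (hbound : ∀ p ∈ (pvCellsD M).items,
      0 ≤ p.1.1 → p.1.1 < p.1.2 → p.1.2 < pvM M → p.1.1 < (s.toList.length : Int)) :
    PySem.Str.join ""
      (((PySem.List.sorted (pvG M size) (fun e => e.1)).foldl
          (fun (pc : List String × Int) e =>
            (pc.1 ++ [String.ofList (List.replicate ((e.1 - pc.2) * max 1 ((pvW M : Nat) : Int)).toNat ' '),
                      String.ofList (e.2.toList ++ List.replicate ((((pvW M : Nat) : Int) - PySem.Str.len e.2).toNat) ' ')],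
             e.1 + 1)) ([], 0)).1
        ++ [String.ofList (List.replicate ((PySem.Str.len s -
              ((PySem.List.sorted (pvG M size) (fun e => e.1)).foldl
                (fun (pc : List String × Int) e =>
                  (pc.1 ++ [String.ofList (List.replicate ((e.1 - pc.2) * max 1 ((pvW M : Nat) : Int)).toNat ' '),
                            String.ofList (e.2.toList ++ List.replicate ((((pvW M : Nat) : Int) - PySem.Str.len e.2).toNat) ' ')],
                   e.1 + 1)) ([], 0)).2)
              * max 1 ((pvW M : Nat) : Int)).toNat ' ')])
    = pvRow M s size := by
  have hstep : (fun (pc : List String × Int) (e : Int × String) =>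
      (pc.1 ++ [String.ofList (List.replicate ((e.1 - pc.2) * max 1 ((pvW M : Nat) : Int)).toNat ' '),
                String.ofList (e.2.toList ++ List.replicate ((((pvW M : Nat) : Int) - PySem.Str.len e.2).toNat) ' ')],
       e.1 + 1)) = pvStep ((pvW M : Nat) : Int) (max 1 ((pvW M : Nat) : Int)) := rfl
  rw [hstep]
  set S := PySem.List.sorted (pvG M size) (fun e => e.1) with hS
  set w : Int := ((pvW M : Nat) : Int) with hw
  have hmemS : ∀ e, e ∈ S ↔ e ∈ pvG M size := fun e => PySem.List.mem_sorted _ _ _ e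
  have hchars : (PySem.Str.join ""
      ((S.foldl (pvStep w (max 1 w)) ([], 0)).1
        ++ [String.ofList (List.replicate ((PySem.Str.len s -
              (S.foldl (pvStep w (max 1 w)) ([], 0)).2) * max 1 w).toNat ' ')])).toList
      = (pvRow M s size).toList := by
    rw [pvJoinEmpty, List.map_append, List.flatten_append]
    have hfin : (([String.ofList (List.replicate ((PySem.Str.len s -
          (S.foldl (pvStep w (max 1 w)) ([], 0)).2) * max 1 w).toNat ' ')].map String.toList).flatten)
        = List.replicate ((PySem.Str.len s - (S.foldl (pvStep w (max 1 w)) ([], 0)).2) * max 1 w).toNat ' ' := by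
      simp [String.toList_ofList]
    rw [hfin, pvFoldPieces w (max 1 w) (PySem.Str.len s) S [] 0]
    have hn : PySem.Str.len s = ((s.toList.length : Nat) : Int) := PySem.Str.len_eq s
    have hz : (0 : Int) = ((0 : Nat) : Int) := rfl
    rw [List.map_nil, List.flatten_nil, List.nil_append, hn, hz, hw]
    rw [pvRenderCells (pvW M) s.toList.length
        (fun k : Nat => (pvRowCell M size ((k : Nat) : Int)).toList) S 0 ?pw ?bd ?pad ?blank]
    · rw [pvRow_toList, Nat.sub_zero]
    case pw =>
      have h1 : S.Pairwise (fun a b => a.1 ≤ b.1) := PySem.List.sorted_pairwise _ _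
      have h2 : S.Pairwise (fun a b => a.1 ≠ b.1) := by
        rw [(PySem.List.sorted_perm (pvG M size) (fun e => e.1) false).pairwise_iff
          (fun h => Ne.symm h)]
        exact pvG_pairwise M size
      exact (h1.and h2).imp (fun h => lt_of_le_of_ne h.1 h.2)
    case bd =>
      intro e he
      have hg := (pvG_mem M size e).1 ((hmemS e).1 he)
      obtain ⟨hget, h0, hlt, hm⟩ := hg
      refine ⟨by exact_mod_cast h0, ?_⟩
      have := hbound ((e.1, e.1 + size), e.2)
        (PySem.Dict.mem_items_of_get?_eq_some (d := pvCellsD M) hget) h0 hlt hm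
      exact_mod_cast this
    case pad =>
      intro e he
      have hg := (pvG_mem M size e).1 ((hmemS e).1 he)
      obtain ⟨hget, h0, hlt, hm⟩ := hg
      have hie : ((e.1.toNat : Nat) : Int) = e.1 := by omega
      unfold pvRowCell
      beta_reduce
      rw [hie]
      rw [if_pos ?_]
      · rw [hget]
        show (pvPadI ((pvW M : Nat) : Int) e.2).toList = _
        exact pvPadI_toList (pvW M) e.2
      · rw [Bool.and_eq_true, decide_eq_true_eq]
        constructor
        · rw [PySem.Dict.contains_eq_isSome_get?, hget]
          rfl
        · exact hm
    case blank =>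
      intro k _ hk2 hk3
      unfold pvRowCell
      beta_reduce
      by_cases hc : ((pvCellsD M).contains ((k : Int), (k : Int) + size)
          && decide ((k : Int) + size < pvM M)) = true
      · exfalso
        rw [Bool.and_eq_true, decide_eq_true_eq] at hc
        obtain ⟨hcon, hm⟩ := hc
        have hiso : ((pvCellsD M).get? ((k : Int), (k : Int) + size)).isSome := by
          rw [← PySem.Dict.contains_eq_isSome_get?]
          exact hcon
        obtain ⟨v, hv⟩ := Option.isSome_iff_exists.1 hiso
        have hmem : ((k : Int), v) ∈ pvG M size := by
          rw [pvG_mem]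
          exact ⟨hv, by omega, by omega, hm⟩
        exact hk3 ((k : Int), v) ((hmemS _).2 hmem) rfl
      · rw [if_neg (by simpa using hc)]
        exact pvBlank_toList (pvW M)
  have hfinal := congrArg String.ofList hchars
  rwa [String.ofList_toList, String.ofList_toList] at hfinal

theorem pvB_canon (mt nm s : String) (hpre : Pre_show_parses mt nm s) :
    show_parses_alt mt nm s = pvCanon (pvMatching mt nm) s := by
  simp only [show_parses_alt]
  rw [pvFactsFold mt nm]
  dsimp only
  have hm : (((pvNamesL (pvMatching mt nm)).length : Nat) : Int) = pvM (pvMatching mt nm) := rfl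
  rw [hm, pvItemsFold (pvMatching mt nm)]
  dsimp only
  unfold pvCanon
  refine congrArg String.ofList (congrArg₂ (· ++ ·) ?_ ?_)
  · refine congrArg String.toList (congrArg (PySem.Str.join "\n") ?_)
    apply List.map_congr_left
    intro size hsize
    rw [pvRange_rev] at hsize
    have hsz : 0 < size := by
      have := PySem.List.mem_pyRange_one.1 (List.mem_reverse.1 hsize)
      omega
    rw [pvBySize_getD]
    exact pvLineEq (pvMatching mt nm) s size hsz (pvPre_bound mt nm s hpre)
  · refine congrArg (fun t => '\n' :: t) (congrArg String.toList (congrArg (PySem.Str.join "") ?_))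
    apply List.map_congr_left
    intro c _
    unfold pvPadI
    have h1 : (String.ofList [c]).toList = [c] := String.toList_ofList
    rw [h1]
    have h2 : PySem.Str.len (String.ofList [c]) = 1 := by
      rw [PySem.Str.len_eq, h1]
      rfl
    rw [h2]
    rfl

-- ===== VERDICT (by name: the statement is the Claim_ definition above) =====
theorem show_parses_spec : Claim_equal_show_parses := by
  intro mt nm s _ hpre
  unfold Spec_show_parses
  rw [pvA_canon, pvB_canon mt nm s hpre]
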